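-- pv_equiv track=rewrite | github.com/xfedor18/python-VUT- | isj_proj3_xfedor18.py | to_pilot_alpha
-- ===== SOURCE A (Python) =====
-- def to_pilot_alpha(word):
--     """Returns a list of pilot alpha codes corresponding to the input word
--
--     >>> to_pilot_alpha('Smrz')
--     ['Sierra', 'Mike', 'Romeo', 'Zulu']
--     """
--
--     pilot_alpha = ['Alfa', 'Bravo', 'Charlie', 'Delta', 'Echo', 'Foxtrot',
--                    'Golf', 'Hotel', 'India', 'Juliett', 'Kilo', 'Lima', 'Mike',
--                    'November', 'Oscar', 'Papa', 'Quebec', 'Romeo', 'Sierra', 'Tango',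
--                    'Uniform', 'Victor', 'Whiskey', 'Xray', 'Yankee', 'Zulu']
--
--     pilot_alpha_list = []
--     for i in range(len(word)):
--         for j in range(len(pilot_alpha)):
--             if pilot_alpha[j].lower().startswith(word[i].lower()):
--                 pilot_alpha_list.append(pilot_alpha[j])
--     return pilot_alpha_list
-- ===== SOURCE B (Python) =====
-- def to_pilot_alpha(word):
--     """Returns a list of pilot alpha codes corresponding to the input word"""
--     pilot_alpha = ['Alfa', 'Bravo', 'Charlie', 'Delta', 'Echo', 'Foxtrot',
--                    'Golf', 'Hotel', 'India', 'Juliett', 'Kilo', 'Lima', 'Mike',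
--                    'November', 'Oscar', 'Papa', 'Quebec', 'Romeo', 'Sierra', 'Tango',
--                    'Uniform', 'Victor', 'Whiskey', 'Xray', 'Yankee', 'Zulu']
--     index = {w[0].lower(): w for w in pilot_alpha}
--     out = []
--     for ch in word:
--         w = index.get(ch.lower())
--         if w is not None:
--             out.append(w)
--     return out
-- ===== Notes on version B (the rewrite author's own statement) =====
-- stated objective: faster
-- what changed: Replaces the nested loops (scanning all 26 NATO words with startswith for every character) by a dict built once from each word's lowercase first letter, then a single pass over the characters with one .get lookup each.
import Mathlib
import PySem

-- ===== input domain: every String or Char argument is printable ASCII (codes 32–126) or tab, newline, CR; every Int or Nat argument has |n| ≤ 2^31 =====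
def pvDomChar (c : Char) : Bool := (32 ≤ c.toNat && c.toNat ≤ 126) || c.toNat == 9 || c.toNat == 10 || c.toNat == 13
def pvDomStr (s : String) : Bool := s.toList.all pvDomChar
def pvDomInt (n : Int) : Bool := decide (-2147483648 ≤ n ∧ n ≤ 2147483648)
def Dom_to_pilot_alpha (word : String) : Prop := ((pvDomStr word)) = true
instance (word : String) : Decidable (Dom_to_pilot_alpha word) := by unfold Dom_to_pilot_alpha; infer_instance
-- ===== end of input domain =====

-- B replaces A's nested loop (a scan of all 26 NATO words with startswith per character)
-- by a first-letter → word dict built once and a single lookup pass over the characters.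

-- ===== PORT A =====
def pilotAlphaA : List String :=
  ["Alfa", "Bravo", "Charlie", "Delta", "Echo", "Foxtrot", "Golf", "Hotel", "India", "Juliett", "Kilo", "Lima", "Mike", "November", "Oscar", "Papa", "Quebec", "Romeo", "Sierra", "Tango", "Uniform", "Victor", "Whiskey", "Xray", "Yankee", "Zulu"]

-- for i in range(len(word)): for j in range(len(pilot_alpha)):
--   if pilot_alpha[j].lower().startswith(word[i].lower()): append pilot_alpha[j]
def to_pilot_alpha (word : String) : List String :=
  (PySem.List.pyRange 0 (word.toList.length) 1).foldl
    (fun acc i =>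
      (PySem.List.pyRange 0 (pilotAlphaA.length) 1).foldl
        (fun acc2 j =>
          if PySem.Chars.startswith (PySem.Chars.lower (PySem.List.pyGetD pilotAlphaA j "").toList)
               (PySem.Chars.lower [PySem.List.pyGetD word.toList i ' ']) then
            acc2 ++ [PySem.List.pyGetD pilotAlphaA j ""]
          else acc2)
        acc)
    []

-- ===== PORT B =====
def pilotAlphaB : List String :=
  ["Alfa", "Bravo", "Charlie", "Delta", "Echo", "Foxtrot", "Golf", "Hotel", "India", "Juliett", "Kilo", "Lima", "Mike", "November", "Oscar", "Papa", "Quebec", "Romeo", "Sierra", "Tango", "Uniform", "Victor", "Whiskey", "Xray", "Yankee", "Zulu"]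

-- index = {w[0].lower(): w for w in pilot_alpha}
def natoIndex : PySem.Dict Char String :=
  pilotAlphaB.foldl (fun d w => d.insert (PySem.Chars.lowerChar (w.toList.headD ' ')) w)
    PySem.Dict.empty

-- for ch in word: w = index.get(ch.lower()); if w is not None: out.append(w)
def to_pilot_alpha_alt (word : String) : List String :=
  word.toList.foldl
    (fun out ch =>
      match natoIndex.get? (PySem.Chars.lowerChar ch) with
      | some w => out ++ [w]
      | none => out)
    []

-- ===== PRECONDITION & SPEC =====
def Spec_to_pilot_alpha (word : String) (out : List String) : Prop := out = to_pilot_alpha_alt word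
instance (word : String) (out : List String) : Decidable (Spec_to_pilot_alpha word out) := by unfold Spec_to_pilot_alpha; infer_instance

-- ===== CLAIM (what is proved, stated in full; the proofs are below) =====
def Claim_equal_to_pilot_alpha : Prop := ∀ (word : String), Dom_to_pilot_alpha word → Spec_to_pilot_alpha word (to_pilot_alpha word)

-- ===== LEMMAS AND PROOFS =====

-- per-character agreement of the two step functions
set_option maxHeartbeats 1000000 in
theorem step_eq' (e : Char) :
    pilotAlphaA.filter
        (fun w => PySem.Chars.startswith (PySem.Chars.lower w.toList) [e]) =
      (match natoIndex.get? e with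
        | some w => [w]
        | none => ([] : List String)) := by
  have hni : natoIndex = PySem.Dict.mk [('a', "Alfa"), ('b', "Bravo"), ('c', "Charlie"), ('d', "Delta"), ('e', "Echo"), ('f', "Foxtrot"), ('g', "Golf"), ('h', "Hotel"), ('i', "India"), ('j', "Juliett"), ('k', "Kilo"), ('l', "Lima"), ('m', "Mike"), ('n', "November"), ('o', "Oscar"), ('p', "Papa"), ('q', "Quebec"), ('r', "Romeo"), ('s', "Sierra"), ('t', "Tango"), ('u', "Uniform"), ('v', "Victor"), ('w', "Whiskey"), ('x', "Xray"), ('y', "Yankee"), ('z', "Zulu")] := by decide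
  by_cases h0 : e = 'a'
  · subst h0; decide
  by_cases h1 : e = 'b'
  · subst h1; decide
  by_cases h2 : e = 'c'
  · subst h2; decide
  by_cases h3 : e = 'd'
  · subst h3; decide
  by_cases h4 : e = 'e'
  · subst h4; decide
  by_cases h5 : e = 'f'
  · subst h5; decide
  by_cases h6 : e = 'g'
  · subst h6; decide
  by_cases h7 : e = 'h'
  · subst h7; decide
  by_cases h8 : e = 'i'
  · subst h8; decide
  by_cases h9 : e = 'j'
  · subst h9; decide
  by_cases h10 : e = 'k'
  · subst h10; decide
  by_cases h11 : e = 'l'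
  · subst h11; decide
  by_cases h12 : e = 'm'
  · subst h12; decide
  by_cases h13 : e = 'n'
  · subst h13; decide
  by_cases h14 : e = 'o'
  · subst h14; decide
  by_cases h15 : e = 'p'
  · subst h15; decide
  by_cases h16 : e = 'q'
  · subst h16; decide
  by_cases h17 : e = 'r'
  · subst h17; decide
  by_cases h18 : e = 's'
  · subst h18; decide
  by_cases h19 : e = 't'
  · subst h19; decide
  by_cases h20 : e = 'u'
  · subst h20; decide
  by_cases h21 : e = 'v'
  · subst h21; decide
  by_cases h22 : e = 'w'
  · subst h22; decide
  by_cases h23 : e = 'x'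
  · subst h23; decide
  by_cases h24 : e = 'y'
  · subst h24; decide
  by_cases h25 : e = 'z'
  · subst h25; decide
  have hnone : natoIndex.get? e = none := by
    rw [hni]
    have g0 : ('a' == e) = false := by simp only [beq_eq_false_iff_ne, ne_eq]; exact fun hh => h0 hh.symm
    have g1 : ('b' == e) = false := by simp only [beq_eq_false_iff_ne, ne_eq]; exact fun hh => h1 hh.symm
    have g2 : ('c' == e) = false := by simp only [beq_eq_false_iff_ne, ne_eq]; exact fun hh => h2 hh.symm
    have g3 : ('d' == e) = false := by simp only [beq_eq_false_iff_ne, ne_eq]; exact fun hh => h3 hh.symm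
    have g4 : ('e' == e) = false := by simp only [beq_eq_false_iff_ne, ne_eq]; exact fun hh => h4 hh.symm
    have g5 : ('f' == e) = false := by simp only [beq_eq_false_iff_ne, ne_eq]; exact fun hh => h5 hh.symm
    have g6 : ('g' == e) = false := by simp only [beq_eq_false_iff_ne, ne_eq]; exact fun hh => h6 hh.symm
    have g7 : ('h' == e) = false := by simp only [beq_eq_false_iff_ne, ne_eq]; exact fun hh => h7 hh.symm
    have g8 : ('i' == e) = false := by simp only [beq_eq_false_iff_ne, ne_eq]; exact fun hh => h8 hh.symm
    have g9 : ('j' == e) = false := by simp only [beq_eq_false_iff_ne, ne_eq]; exact fun hh => h9 hh.symm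
    have g10 : ('k' == e) = false := by simp only [beq_eq_false_iff_ne, ne_eq]; exact fun hh => h10 hh.symm
    have g11 : ('l' == e) = false := by simp only [beq_eq_false_iff_ne, ne_eq]; exact fun hh => h11 hh.symm
    have g12 : ('m' == e) = false := by simp only [beq_eq_false_iff_ne, ne_eq]; exact fun hh => h12 hh.symm
    have g13 : ('n' == e) = false := by simp only [beq_eq_false_iff_ne, ne_eq]; exact fun hh => h13 hh.symm
    have g14 : ('o' == e) = false := by simp only [beq_eq_false_iff_ne, ne_eq]; exact fun hh => h14 hh.symm
    have g15 : ('p' == e) = false := by simp only [beq_eq_false_iff_ne, ne_eq]; exact fun hh => h15 hh.symm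
    have g16 : ('q' == e) = false := by simp only [beq_eq_false_iff_ne, ne_eq]; exact fun hh => h16 hh.symm
    have g17 : ('r' == e) = false := by simp only [beq_eq_false_iff_ne, ne_eq]; exact fun hh => h17 hh.symm
    have g18 : ('s' == e) = false := by simp only [beq_eq_false_iff_ne, ne_eq]; exact fun hh => h18 hh.symm
    have g19 : ('t' == e) = false := by simp only [beq_eq_false_iff_ne, ne_eq]; exact fun hh => h19 hh.symm
    have g20 : ('u' == e) = false := by simp only [beq_eq_false_iff_ne, ne_eq]; exact fun hh => h20 hh.symm
    have g21 : ('v' == e) = false := by simp only [beq_eq_false_iff_ne, ne_eq]; exact fun hh => h21 hh.symm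
    have g22 : ('w' == e) = false := by simp only [beq_eq_false_iff_ne, ne_eq]; exact fun hh => h22 hh.symm
    have g23 : ('x' == e) = false := by simp only [beq_eq_false_iff_ne, ne_eq]; exact fun hh => h23 hh.symm
    have g24 : ('y' == e) = false := by simp only [beq_eq_false_iff_ne, ne_eq]; exact fun hh => h24 hh.symm
    have g25 : ('z' == e) = false := by simp only [beq_eq_false_iff_ne, ne_eq]; exact fun hh => h25 hh.symm
    simp [PySem.Dict.get?, g0, g1, g2, g3, g4, g5, g6, g7, g8, g9, g10, g11, g12, g13, g14, g15, g16, g17, g18, g19, g20, g21, g22, g23, g24, g25]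
  rw [hnone]
  have hw0 : PySem.Chars.lower ['A','l','f','a'] = ['a','l','f','a'] := by decide
  have hw1 : PySem.Chars.lower ['B','r','a','v','o'] = ['b','r','a','v','o'] := by decide
  have hw2 : PySem.Chars.lower ['C','h','a','r','l','i','e'] = ['c','h','a','r','l','i','e'] := by decide
  have hw3 : PySem.Chars.lower ['D','e','l','t','a'] = ['d','e','l','t','a'] := by decide
  have hw4 : PySem.Chars.lower ['E','c','h','o'] = ['e','c','h','o'] := by decide
  have hw5 : PySem.Chars.lower ['F','o','x','t','r','o','t'] = ['f','o','x','t','r','o','t'] := by decide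
  have hw6 : PySem.Chars.lower ['G','o','l','f'] = ['g','o','l','f'] := by decide
  have hw7 : PySem.Chars.lower ['H','o','t','e','l'] = ['h','o','t','e','l'] := by decide
  have hw8 : PySem.Chars.lower ['I','n','d','i','a'] = ['i','n','d','i','a'] := by decide
  have hw9 : PySem.Chars.lower ['J','u','l','i','e','t','t'] = ['j','u','l','i','e','t','t'] := by decide
  have hw10 : PySem.Chars.lower ['K','i','l','o'] = ['k','i','l','o'] := by decide
  have hw11 : PySem.Chars.lower ['L','i','m','a'] = ['l','i','m','a'] := by decide
  have hw12 : PySem.Chars.lower ['M','i','k','e'] = ['m','i','k','e'] := by decide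
  have hw13 : PySem.Chars.lower ['N','o','v','e','m','b','e','r'] = ['n','o','v','e','m','b','e','r'] := by decide
  have hw14 : PySem.Chars.lower ['O','s','c','a','r'] = ['o','s','c','a','r'] := by decide
  have hw15 : PySem.Chars.lower ['P','a','p','a'] = ['p','a','p','a'] := by decide
  have hw16 : PySem.Chars.lower ['Q','u','e','b','e','c'] = ['q','u','e','b','e','c'] := by decide
  have hw17 : PySem.Chars.lower ['R','o','m','e','o'] = ['r','o','m','e','o'] := by decide
  have hw18 : PySem.Chars.lower ['S','i','e','r','r','a'] = ['s','i','e','r','r','a'] := by decide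
  have hw19 : PySem.Chars.lower ['T','a','n','g','o'] = ['t','a','n','g','o'] := by decide
  have hw20 : PySem.Chars.lower ['U','n','i','f','o','r','m'] = ['u','n','i','f','o','r','m'] := by decide
  have hw21 : PySem.Chars.lower ['V','i','c','t','o','r'] = ['v','i','c','t','o','r'] := by decide
  have hw22 : PySem.Chars.lower ['W','h','i','s','k','e','y'] = ['w','h','i','s','k','e','y'] := by decide
  have hw23 : PySem.Chars.lower ['X','r','a','y'] = ['x','r','a','y'] := by decide
  have hw24 : PySem.Chars.lower ['Y','a','n','k','e','e'] = ['y','a','n','k','e','e'] := by decide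
  have hw25 : PySem.Chars.lower ['Z','u','l','u'] = ['z','u','l','u'] := by decide
  simp [pilotAlphaA, PySem.Chars.startswith, List.isPrefixOf, hw0, hw1, hw2, hw3, hw4, hw5, hw6, hw7, hw8, hw9, hw10, hw11, hw12, hw13, hw14, hw15, hw16, hw17, hw18, hw19, hw20, hw21, hw22, hw23, hw24, hw25, h0, h1, h2, h3, h4, h5, h6, h7, h8, h9, h10, h11, h12, h13, h14, h15, h16, h17, h18, h19, h20, h21, h22, h23, h24, h25]

theorem step_eq (c : Char) :
    pilotAlphaA.filter
        (fun w => PySem.Chars.startswith (PySem.Chars.lower w.toList)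
          (PySem.Chars.lower [c])) =
      (match natoIndex.get? (PySem.Chars.lowerChar c) with
        | some w => [w]
        | none => ([] : List String)) := by
  have hc : PySem.Chars.lower [c] = [PySem.Chars.lowerChar c] := by simp [PySem.Chars.lower]
  simp only [hc]
  exact step_eq' (PySem.Chars.lowerChar c)

-- A's nested index loops, as a flatMap of the per-character filter
theorem a_eq_flatMap (word : String) :
    to_pilot_alpha word =
      word.toList.flatMap (fun c => pilotAlphaA.filter
        (fun w => PySem.Chars.startswith (PySem.Chars.lower w.toList)
          (PySem.Chars.lower [c]))) := by
  unfold to_pilot_alpha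
  rw [PySem.List.foldl_pyRange_zero_pyGetD' word.toList ' '
    (fun acc c =>
      (PySem.List.pyRange 0 (pilotAlphaA.length) 1).foldl
        (fun acc2 j =>
          if PySem.Chars.startswith (PySem.Chars.lower (PySem.List.pyGetD pilotAlphaA j "").toList)
               (PySem.Chars.lower [c]) then
            acc2 ++ [PySem.List.pyGetD pilotAlphaA j ""]
          else acc2)
        acc) []]
  rw [PySem.List.foldl_congr_mem word.toList _
    (fun acc c => acc ++ pilotAlphaA.filter
      (fun w => PySem.Chars.startswith (PySem.Chars.lower w.toList) (PySem.Chars.lower [c]))) []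
    (by
      intro acc c _
      rw [PySem.List.foldl_pyRange_zero_pyGetD' pilotAlphaA ""
        (fun acc2 w =>
          if PySem.Chars.startswith (PySem.Chars.lower w.toList) (PySem.Chars.lower [c]) then
            acc2 ++ [w]
          else acc2) acc]
      exact PySem.List.foldl_append_if_eq_filter _ _ _)]
  rw [PySem.List.foldl_append_eq_flatMap]
  simp

-- B's single pass, as a flatMap of the per-character lookup
theorem b_eq_flatMap (word : String) :
    to_pilot_alpha_alt word =
      word.toList.flatMap (fun c =>
        match natoIndex.get? (PySem.Chars.lowerChar c) with
        | some w => [w]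
        | none => ([] : List String)) := by
  unfold to_pilot_alpha_alt
  rw [PySem.List.foldl_congr_mem word.toList _
    (fun out c => out ++
      (match natoIndex.get? (PySem.Chars.lowerChar c) with
        | some w => [w]
        | none => ([] : List String))) []
    (by
      intro out c _
      cases h : natoIndex.get? (PySem.Chars.lowerChar c) <;> simp [h])]
  rw [PySem.List.foldl_append_eq_flatMap]
  simp

-- ===== VERDICT (by name: the statement is the Claim_ definition above) =====
theorem to_pilot_alpha_spec : Claim_equal_to_pilot_alpha := by
  intro word _
  unfold Spec_to_pilot_alpha
  rw [a_eq_flatMap, b_eq_flatMap]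
  exact List.flatMap_congr (fun c _ => step_eq c)
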